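-- pv_equiv track=rewrite | github.com/babyworm/SECDED_hmatrix_generator | src/gen_hmatrix.py | _hamming_data_columns
-- ===== SOURCE A (Python) =====
-- from typing import List, Tuple, Literal
--
-- def _unit_vectors(r: int) -> List[int]:
--     return [1 << i for i in range(r)]
--
-- def _hamming_data_columns(r: int, k: int) -> List[int]:
--     """
--     Classic Hamming SEC columns: use ascending nonzero integers excluding powers of two.
--     We reserve unit vectors as parity columns in systematic form, then fill data columns.
--     """
--     units = set(_unit_vectors(r))
--     cols: List[int] = []
--     v = 1
--     while len(cols) < k:
--         if v != 0 and v not in units and v < (1 << r):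
--             cols.append(v)
--         v += 1
--         if v >= (1 << r):  # ran out of nonzero vectors
--             raise ValueError(f"Not enough vectors for k={k} with r={r} (increase r?)")
--     return cols
-- ===== SOURCE B (Python) =====
-- from typing import List
--
-- def _hamming_data_columns(r: int, k: int) -> List[int]:
--     """
--     Classic Hamming SEC columns: ascending nonzero integers excluding powers of two.
--     Block decomposition: the non-powers below 2**r are exactly the runs
--     (2**i, 2**(i+1)) for i < r, emitted in order until k columns are collected.
--     """
--     if k <= 0:
--         return []
--     if k > (1 << r) - 1 - r:
--         raise ValueError(f"Not enough vectors for k={k} with r={r} (increase r?)")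
--     cols: List[int] = []
--     for i in range(r):
--         need = k - len(cols)
--         if need == 0:
--             break
--         lo = (1 << i) + 1
--         cols.extend(range(lo, min(1 << (i + 1), lo + need)))
--     return cols
-- ===== Notes on version B (the rewrite author's own statement) =====
-- stated objective: faster
-- what changed: B replaces A's per-integer scan with a power-of-two set membership test by a closed-form feasibility check (available = 2^r - 1 - r) followed by bulk emission of the runs of non-powers between consecutive powers of two.
-- crash fix: On inputs with 0 < k = 2^r - 1 - r (k exactly equal to the number of available columns) A raises ValueError because its raise-check runs after the final append, while B returns the complete list of all 2^r - 1 - r non-power columns. — e.g. on _hamming_data_columns(3, 4): A raises ValueError, B returns [3, 5, 6, 7]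
import Mathlib
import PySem

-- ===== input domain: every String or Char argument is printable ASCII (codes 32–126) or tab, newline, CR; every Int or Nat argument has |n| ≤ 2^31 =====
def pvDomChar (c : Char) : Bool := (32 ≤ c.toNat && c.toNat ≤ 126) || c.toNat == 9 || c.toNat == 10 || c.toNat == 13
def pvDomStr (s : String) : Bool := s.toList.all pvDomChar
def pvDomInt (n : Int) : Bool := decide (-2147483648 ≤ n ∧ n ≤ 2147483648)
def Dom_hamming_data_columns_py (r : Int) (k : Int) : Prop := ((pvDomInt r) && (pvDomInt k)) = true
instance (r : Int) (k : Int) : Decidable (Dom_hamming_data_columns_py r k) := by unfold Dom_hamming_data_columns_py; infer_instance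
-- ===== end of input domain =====

-- B replaces A's per-integer scan with a set membership test by a closed-form
-- feasibility check plus bulk emission of the runs of non-powers between
-- consecutive powers of two; return-value equivalence proved on Pre_, which
-- excludes exactly the inputs where A raises.

-- ===== PORT A =====
-- 1 << j (j ≥ 0), Python-exact: core Int/Nat shift
def pvShl1 (j : Nat) : Int := (1 : Int) <<< j

-- units = set(1 << i for i in range(r)); i ≥ 0 inside range(r), so `1 <<< i.toNat` is exact
def pvAUnits (r : Int) : PySem.Set Int :=
  PySem.Set.ofList ((PySem.List.pyRange 0 r 1).map (fun i => pvShl1 i.toNat))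

-- the while loop; fuel = 2^r bounds the trip count (v starts at 1 and the loop
-- raises before v exceeds 2^r, so the fuel-0 branch is never reached); the
-- `raise ValueError` path returns [] (excluded by Pre_)
def pvALoop (units : PySem.Set Int) (lim k : Int) : Nat → List Int → Int → List Int
  | 0, cols, _ => cols
  | fuel+1, cols, v =>
    if (PySem.List.len cols) < k then
      let cols' := if v ≠ 0 ∧ ¬ (PySem.Set.contains units v = true) ∧ v < lim
                   then cols ++ [v] else cols
      if v + 1 ≥ lim then []  -- raise ValueError("Not enough vectors …")
      else pvALoop units lim k fuel cols' (v + 1)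
    else cols

def hamming_data_columns_py (r : Int) (k : Int) : List Int :=
  let units := pvAUnits r
  let lim : Int := pvShl1 r.toNat  -- 1 << r; for r < 0 Python raises, excluded by Pre_
  pvALoop units lim k lim.toNat [] 1

-- ===== PORT B =====
-- for i in range(r): extend with range(lo, min(1 << (i+1), lo + need)), break when need = 0;
-- recursion on rem = r - i transcribes the for/break
def pvBLoop (k : Int) : Nat → Nat → List Int → List Int
  | _, 0, cols => cols
  | i, rem+1, cols =>
    let need := k - PySem.List.len cols
    if need = 0 then cols  -- break
    else
      let lo : Int := pvShl1 i + 1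
      pvBLoop k (i+1) rem (cols ++ PySem.List.pyRange lo (min (pvShl1 (i+1)) (lo + need)) 1)

def hamming_data_columns_py_alt (r : Int) (k : Int) : List Int :=
  if k ≤ 0 then []
  else if k > pvShl1 r.toNat - 1 - r then []  -- raise ValueError("Not enough vectors …")
  else pvBLoop k 0 r.toNat []

-- ===== PRECONDITION & SPEC =====
-- Pre_ admits exactly the inputs where A returns: k ≤ 0 (immediate []), or
-- 0 ≤ r with k < 2^r - 1 - r (A raises ValueError already at k = 2^r - 1 - r,
-- see Raises_ below, and raises a negative-shift ValueError for r < 0 with k > 0).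
-- The exponent `min r 64` is ONLY an evaluation guard (never compute 2^r for an
-- astronomical r): since 2^(min r 64) ≤ 2^r, the condition IMPLIES k < 2^r - 1 - r
-- for every r, and it coincides with it whenever k < 2^64 - 1 - r — far beyond the
-- |k| ≤ 2^31 domain — so it excludes no input of the domain on which A returns.
def Pre_hamming_data_columns_py (r : Int) (k : Int) : Prop :=
  k ≤ 0 ∨ (0 ≤ r ∧ k < (2 : Int) ^ (min r 64).toNat - 1 - r)
instance (r : Int) (k : Int) : Decidable (Pre_hamming_data_columns_py r k) := by
  unfold Pre_hamming_data_columns_py; infer_instance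

def pvWitness_hamming_data_columns_py : Int × Int := (3, 2)

-- A raises ValueError("Not enough vectors for k=… with r=… (increase r?)") even when
-- k equals the number 2^r - 1 - r of available columns (its raise-check runs after the
-- final append); B returns the full list of all 2^r - 1 - r non-power columns there.
-- The conjunct r ≤ 33 only keeps evaluation cheap: on Dom, k = 2^r - 1 - r forces r ≤ 33.
def Raises_hamming_data_columns_py (r : Int) (k : Int) : Prop :=
  0 < k ∧ 0 ≤ r ∧ r ≤ 33 ∧ k = (2 : Int) ^ r.toNat - 1 - r
instance (r : Int) (k : Int) : Decidable (Raises_hamming_data_columns_py r k) := by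
  unfold Raises_hamming_data_columns_py; infer_instance

def pvRaiseWitness_hamming_data_columns_py : Int × Int := (3, 4)
def pvRaiseWitnessOut_hamming_data_columns_py : List Int := [3, 5, 6, 7]

def Spec_hamming_data_columns_py (r : Int) (k : Int) (out : List Int) : Prop := out = hamming_data_columns_py_alt r k
instance (r : Int) (k : Int) (out : List Int) : Decidable (Spec_hamming_data_columns_py r k out) := by unfold Spec_hamming_data_columns_py; infer_instance

-- ===== CLAIM (what is proved, stated in full; the proofs are below) =====
def Claim_equal_hamming_data_columns_py : Prop := ∀ (r : Int) (k : Int), Dom_hamming_data_columns_py r k → Pre_hamming_data_columns_py r k → Spec_hamming_data_columns_py r k (hamming_data_columns_py r k)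

def Claim_raises_hamming_data_columns_py : Prop := (∀ (r : Int) (k : Int), Dom_hamming_data_columns_py r k → Raises_hamming_data_columns_py r k → ¬ Pre_hamming_data_columns_py r k) ∧ (Dom_hamming_data_columns_py (pvRaiseWitness_hamming_data_columns_py.1) (pvRaiseWitness_hamming_data_columns_py.2) ∧ Raises_hamming_data_columns_py (pvRaiseWitness_hamming_data_columns_py.1) (pvRaiseWitness_hamming_data_columns_py.2) ∧ hamming_data_columns_py_alt (pvRaiseWitness_hamming_data_columns_py.1) (pvRaiseWitness_hamming_data_columns_py.2) = pvRaiseWitnessOut_hamming_data_columns_py)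

-- ===== LEMMAS AND PROOFS =====

-- the common reference list: all non-powers of two in [1, 2^m), emitted blockwise
def pvBlocks (m : Nat) : List Int :=
  (List.range m).flatMap (fun i => PySem.List.pyRange ((2:Int)^i + 1) ((2:Int)^(i+1)) 1)

theorem pvBlocks_succ (m : Nat) :
    pvBlocks (m+1) = pvBlocks m ++ PySem.List.pyRange ((2:Int)^m + 1) ((2:Int)^(m+1)) 1 := by
  simp [pvBlocks, List.range_succ]

theorem pvShl1_eq (j : Nat) : pvShl1 j = 2^j := by
  simp [pvShl1, Int.shiftLeft_eq]

theorem pvPowCast (a : Nat) : ((2:Int))^a = ((2^a : Nat) : Int) := by push_cast; ring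

theorem pvBlocks_length (m : Nat) : (pvBlocks m).length = 2^m - 1 - m := by
  induction m with
  | zero => simp [pvBlocks]
  | succ m ih =>
    have h2 : m < 2^m := Nat.lt_two_pow_self
    rw [pvBlocks_succ, List.length_append, ih, PySem.List.length_pyRange_one,
        pvPowCast (m+1), pvPowCast m]
    have h3 : (2:Nat)^(m+1) = 2*2^m := by ring
    omega

-- take of an Int range with step 1
theorem pvTake_pyRange (a b : Int) (t : Nat) :
    (PySem.List.pyRange a b 1).take t = PySem.List.pyRange a (min b (a + t)) 1 := by
  rw [PySem.List.pyRange_one, PySem.List.pyRange_one, ← List.map_take, List.take_range]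
  have h : min t (b - a).toNat = (min b (a + ↑t) - a).toNat := by omega
  rw [h]

-- membership in A's units set
theorem pvMem_units (r x : Int) : x ∈ pvAUnits r ↔ ∃ i : Nat, (i : Int) < r ∧ x = 2^i := by
  unfold pvAUnits
  rw [PySem.Set.mem_ofList, List.mem_map]
  constructor
  · rintro ⟨i, hi, rfl⟩
    rw [PySem.List.mem_pyRange_one] at hi
    exact ⟨i.toNat, by omega, by rw [pvShl1_eq]⟩
  · rintro ⟨j, hj, rfl⟩
    refine ⟨(j : Int), ?_, ?_⟩
    · rw [PySem.List.mem_pyRange_one]; omega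
    · rw [pvShl1_eq, Int.toNat_natCast]

theorem pvBlocks_prefix (i n : Nat) (h : i ≤ n) : ∃ s, pvBlocks n = pvBlocks i ++ s := by
  obtain ⟨d, rfl⟩ : ∃ d, n = i + d := ⟨n - i, by omega⟩
  clear h
  induction d with
  | zero => exact ⟨[], by simp⟩
  | succ d ih =>
    obtain ⟨s, hs⟩ := ih
    exact ⟨s ++ _, by rw [← Nat.add_assoc, pvBlocks_succ, hs, List.append_assoc]⟩

-- B's loop invariant
theorem pvBLoop_spec (k : Int) (n : Nat) :
    ∀ rem i cols, i + rem = n → cols = (pvBlocks i).take k.toNat → 0 ≤ k →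
      pvBLoop k i rem cols = (pvBlocks n).take k.toNat := by
  intro rem
  induction rem with
  | zero =>
    intro i cols hin hcols _
    obtain rfl : i = n := by omega
    simpa [pvBLoop] using hcols
  | succ rem ih =>
    intro i cols hin hcols hk
    have hlen : cols.length = min k.toNat (pvBlocks i).length := by
      rw [hcols, List.length_take]
    rw [pvBLoop]
    simp only [PySem.List.len_eq]
    split_ifs with h0
    · -- need = 0 : cols is already complete
      have hlk : (cols.length : Int) = k := by omega
      have hkle : k.toNat ≤ (pvBlocks i).length := by omega
      obtain ⟨s, hs⟩ := pvBlocks_prefix i n (by omega)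
      rw [hs, List.take_append_of_le_length hkle, hcols]
    · -- need > 0 : cols = pvBlocks i entirely, extend with the next block
      have hlt : cols.length < k.toNat := by omega
      have hfull : (pvBlocks i).length ≤ k.toNat := by omega
      have hcolsf : cols = pvBlocks i := by
        rw [hcols, List.take_of_length_le hfull]
      apply ih (i+1) _ (by omega) _ hk
      rw [pvShl1_eq, pvShl1_eq, hcolsf, pvBlocks_succ, List.take_append, 
          List.take_of_length_le hfull, pvTake_pyRange]
      have harg : (k - ((pvBlocks i).length : Int)) = ((k.toNat - (pvBlocks i).length : Nat) : Int) := by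
        omega
      rw [harg]

-- A's loop invariant (lim = 2^n; candidates drawn from [v, lim-2])
theorem pvALoop_spec (r k lim : Int) (hlim : lim = pvShl1 r.toNat) :
    ∀ (fuel : Nat) (v : Int) (cols : List Int),
      1 ≤ v → v ≤ lim - 1 → (fuel : Int) + v ≥ lim + 1 →
      0 ≤ k - cols.length →
      k - cols.length ≤ (((PySem.List.pyRange v (lim - 1) 1).filter
        (fun w => decide (w ≠ 0 ∧ ¬ (PySem.Set.contains (pvAUnits r) w = true) ∧ w < lim))).length : Int) →
      pvALoop (pvAUnits r) lim k fuel cols v =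
        cols ++ ((PySem.List.pyRange v (lim - 1) 1).filter
          (fun w => decide (w ≠ 0 ∧ ¬ (PySem.Set.contains (pvAUnits r) w = true) ∧ w < lim))).take (k - cols.length).toNat := by
  intro fuel
  induction fuel with
  | zero => intro v cols h1 h2 h3 _ _; exfalso; omega
  | succ fuel ih =>
    intro v cols h1 h2 h3 hge hneed
    rw [pvALoop]
    simp only [PySem.List.len_eq]
    split_ifs with hlt hraise hP
    · -- raise branch: unreachable, the needed columns fit below lim - 1
      exfalso
      have hvlt : v < lim - 1 := by
        by_contra hv
        rw [PySem.List.pyRange_one_eq_nil (by omega)] at hneed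
        simp at hneed
        omega
      omega
    · -- v appended
      have hvlt : v < lim - 1 := by omega
      rw [PySem.List.pyRange_one_cons hvlt] at hneed ⊢
      rw [List.filter_cons] at hneed ⊢
      simp only [decide_eq_true hP, if_true] at hneed ⊢
      rw [ih (v+1) (cols ++ [v]) (by omega) (by omega) (by omega)
          (by simp; omega) (by simp at hneed ⊢; omega)]
      have ht : (k - (cols.length : Int)).toNat = (k - ((cols ++ [v]).length : Int)).toNat + 1 := by
        simp; omega
      rw [ht, List.take_succ_cons]
      simp
    · -- v skipped (a power of two)
      have hvlt : v < lim - 1 := by omega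
      rw [PySem.List.pyRange_one_cons hvlt] at hneed ⊢
      rw [List.filter_cons] at hneed ⊢
      simp only [decide_eq_false hP] at hneed ⊢
      exact ih (v+1) cols (by omega) (by omega) (by omega) (by omega) hneed
    · -- k - cols.length = 0: nothing to take
      have : (k - (cols.length : Int)).toNat = 0 := by omega
      rw [this]
      simp

-- the scanned candidates are exactly the blocks
theorem pvFilter_eq_blocks (r : Int) (hr : 0 ≤ r) :
    (PySem.List.pyRange 1 ((2:Int)^r.toNat) 1).filter
      (fun w => decide (w ≠ 0 ∧ ¬ (PySem.Set.contains (pvAUnits r) w = true) ∧ w < (2:Int)^r.toNat)) =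
    pvBlocks r.toNat := by
  suffices haux : ∀ m : Nat, m ≤ r.toNat →
      (PySem.List.pyRange 1 ((2:Int)^m) 1).filter
        (fun w => decide (w ≠ 0 ∧ ¬ (PySem.Set.contains (pvAUnits r) w = true) ∧ w < (2:Int)^r.toNat)) =
      pvBlocks m by
    exact haux r.toNat le_rfl
  intro m
  induction m with
  | zero =>
    intro _
    rw [pow_zero, PySem.List.pyRange_one_eq_nil le_rfl]
    rfl
  | succ m ih =>
    intro hmn
    have hp : (0:Int) < 2^m := by positivity
    have hpc : ((2:Int))^m = ((2^m : Nat) : Int) := pvPowCast m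
    have hpc1 : ((2:Int))^(m+1) = ((2^(m+1) : Nat) : Int) := pvPowCast (m+1)
    have h2 : (2:Nat)^(m+1) = 2*2^m := by ring
    rw [PySem.List.pyRange_one_append 1 ((2:Int)^m) ((2:Int)^(m+1)) (by omega)
          (by rw [hpc, hpc1]; exact_mod_cast Nat.pow_le_pow_right (by norm_num) (by omega)),
        List.filter_append, ih (by omega), pvBlocks_succ]
    congr 1
    rw [PySem.List.pyRange_one_cons (by rw [hpc, hpc1]; omega), List.filter_cons]
    have hunit : PySem.Set.contains (pvAUnits r) ((2:Int)^m) = true := by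
      rw [PySem.Set.contains_iff, pvMem_units]
      exact ⟨m, by omega, rfl⟩
    rw [if_neg (by
      simp only [decide_eq_true_eq]
      rintro ⟨-, hc, -⟩
      exact hc hunit)]
    apply List.filter_eq_self.mpr
    intro w hw
    rw [PySem.List.mem_pyRange_one] at hw
    have hwlt : w < (2:Int)^r.toNat := by
      have : ((2:Nat))^(m+1) ≤ 2^r.toNat := Nat.pow_le_pow_right (by norm_num) hmn
      rw [hpc1] at hw
      rw [pvPowCast r.toNat]
      omega
    refine decide_eq_true ⟨by omega, ?_, hwlt⟩
    rw [PySem.Set.contains_iff, pvMem_units]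
    rintro ⟨i, hir, hwi⟩
    rcases Nat.lt_or_ge i (m+1) with hi | hi
    · have : (2:Int)^i ≤ 2^m := by
        rw [hpc, pvPowCast i]
        exact_mod_cast Nat.pow_le_pow_right (by norm_num) (by omega)
      omega
    · have : (2:Int)^(m+1) ≤ 2^i := by
        rw [hpc1, pvPowCast i]
        exact_mod_cast Nat.pow_le_pow_right (by norm_num) hi
      rw [hpc1] at hw
      omega

theorem pvALoop_const (u : PySem.Set Int) (lim k : Int) (cols : List Int)
    (h : ¬ ((cols.length : Int) < k)) : ∀ fuel v, pvALoop u lim k fuel cols v = cols := by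
  intro fuel v
  cases fuel with
  | zero => rfl
  | succ f => simp [pvALoop, PySem.List.len_eq, h]

-- ===== VERDICT (by name: the statement is the Claim_ definition above) =====
theorem hamming_data_columns_py_spec : Claim_equal_hamming_data_columns_py := by
  intro r k _hdom hpre
  unfold Spec_hamming_data_columns_py
  have hA : hamming_data_columns_py r k
      = pvALoop (pvAUnits r) (pvShl1 r.toNat) k (pvShl1 r.toNat).toNat [] 1 := rfl
  unfold hamming_data_columns_py_alt
  by_cases hk : k ≤ 0
  · rw [hA, pvALoop_const _ _ _ _ (by simp; omega), if_pos hk]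
  · push Not at hk
    rw [if_neg (by omega)]
    obtain ⟨hr0, hcap⟩ := hpre.resolve_left (by omega)
    have hpcn : (2:Int)^r.toNat = ((2^r.toNat : Nat) : Int) := pvPowCast r.toNat
    -- remove the evaluation guard from Pre_: 2^(min r 64) ≤ 2^r
    have hk2 : k < (2:Int)^r.toNat - 1 - r := by
      rcases le_or_gt r 64 with h64 | h64
      · rwa [min_eq_left h64] at hcap
      · rw [min_eq_right (le_of_lt h64)] at hcap
        have hmono : ((2:Nat))^(64:Int).toNat ≤ 2^r.toNat :=
          Nat.pow_le_pow_right (by norm_num) (by omega)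
        rw [pvPowCast (64:Int).toNat] at hcap
        omega
    have hn2 : 2 ≤ r.toNat := by
      by_contra h
      have h01 : r.toNat = 0 ∨ r.toNat = 1 := by omega
      rcases h01 with h0 | h0 <;> rw [h0] at hpcn hk2 <;> norm_num at hpcn hk2 <;> omega
    have hNL : (4:Nat) ≤ 2^r.toNat := by
      calc (4:Nat) = 2^2 := by norm_num
      _ ≤ 2^r.toNat := Nat.pow_le_pow_right (by norm_num) hn2
    have hL4 : (4:Int) ≤ (2:Int)^r.toNat := by omega
    -- split the blocks at their last element 2^r - 1, which A's raise-check never reaches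
    set F := (PySem.List.pyRange 1 ((2:Int)^r.toNat - 1) 1).filter
        (fun w => decide (w ≠ 0 ∧ ¬ (PySem.Set.contains (pvAUnits r) w = true) ∧ w < (2:Int)^r.toNat)) with hF
    have hsplit : pvBlocks r.toNat = F ++ [(2:Int)^r.toNat - 1] := by
      rw [← pvFilter_eq_blocks r hr0]
      have hrng : PySem.List.pyRange 1 ((2:Int)^r.toNat) 1
          = PySem.List.pyRange 1 ((2:Int)^r.toNat - 1) 1 ++ [(2:Int)^r.toNat - 1] := by
        have := PySem.List.pyRange_one_succ_right (a := 1) (b := (2:Int)^r.toNat - 1) (by omega)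
        rwa [sub_add_cancel] at this
      rw [hrng, List.filter_append, hF]
      congr 1
      have hlast : ¬ ((2:Int)^r.toNat - 1) ∈ pvAUnits r := by
        rw [pvMem_units]
        rintro ⟨i, hir, hwi⟩
        have hin1 : i ≤ r.toNat - 1 := by omega
        have hle : (2:Nat)^i ≤ 2^(r.toNat - 1) := Nat.pow_le_pow_right (by norm_num) hin1
        have hdb : 2 * (2:Nat)^(r.toNat - 1) = 2^r.toNat := by
          rw [← pow_succ']
          congr 1
          omega
        have h2e : (2:Nat) ≤ 2^(r.toNat - 1) := by
          calc (2:Nat) = 2^1 := by norm_num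
          _ ≤ 2^(r.toNat - 1) := Nat.pow_le_pow_right (by norm_num) (by omega)
        have hci : (2:Int)^i = ((2^i : Nat) : Int) := pvPowCast i
        omega
      simp only [List.filter_cons, List.filter_nil]
      rw [if_pos (decide_eq_true ⟨by omega, by
        rw [PySem.Set.contains_iff]; exact hlast, by omega⟩)]
    have hlenF : F.length + 1 = 2^r.toNat - 1 - r.toNat := by
      have := pvBlocks_length r.toNat
      rw [hsplit, List.length_append] at this
      simpa using this
    have hkF : k.toNat ≤ F.length := by omega
    -- A's loop takes the first k of F
    rw [hA, pvALoop_spec r k (pvShl1 r.toNat) rfl (pvShl1 r.toNat).toNat 1 []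
        (by omega) (by rw [pvShl1_eq]; omega) (by rw [pvShl1_eq]; omega)
        (by simp; omega)
        (by simp only [pvShl1_eq, List.length_nil, Int.natCast_zero, sub_zero, ← hF]; omega)]
    -- B takes the first k of the blocks; the two agree below the last element
    rw [if_neg (by rw [pvShl1_eq]; omega),
        pvBLoop_spec k r.toNat r.toNat 0 [] (by omega) (by simp [pvBlocks]) (by omega),
        hsplit, List.take_append_of_le_length hkF]
    simp only [pvShl1_eq, List.nil_append, List.length_nil, Int.natCast_zero, sub_zero, ← hF]

@[simp]
theorem hamming_data_columns_py_raises : Claim_raises_hamming_data_columns_py := by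
  unfold Claim_raises_hamming_data_columns_py
  constructor
  · intro r k hdom hra hpre
    obtain ⟨hk, hr0, hr33, heq⟩ := hra
    rcases hpre with h | ⟨-, hlt⟩
    · omega
    · rw [min_eq_left (by omega : r ≤ 64)] at hlt
      rw [heq] at hlt
      exact absurd hlt (lt_irrefl _)
  · refine ⟨by decide, by decide, by decide⟩
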